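-- pv_equiv track=rewrite | github.com/le-nicolas/Prolific | export_events.py | _normalize_keyfreq_events
-- ===== SOURCE A (Python) =====
-- def _normalize_keyfreq_events(rows, day_t0, day_t1):
--     collapsed = {}
--     for row in rows:
--         try:
--             stamp = int(row.get("t", 0))
--             value = int(row.get("s", 0))
--         except (TypeError, ValueError):
--             continue
--         if stamp < day_t0 or stamp >= day_t1:
--             continue
--         if value < 0:
--             continue
--         prev = collapsed.get(stamp)
--         if prev is None or value > prev:
--             collapsed[stamp] = value
--
--     return [{"t": t, "s": collapsed[t]} for t in sorted(collapsed)]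
-- ===== SOURCE B (Python) =====
-- def _normalize_keyfreq_events(rows, day_t0, day_t1):
--     events = []
--     for row in rows:
--         try:
--             stamp = int(row.get("t", 0))
--             value = int(row.get("s", 0))
--         except (TypeError, ValueError):
--             continue
--         if day_t0 <= stamp < day_t1 and value >= 0:
--             events.append((stamp, value))
--     return [{"t": t, "s": max(v for s, v in events if s == t)}
--             for t in sorted({s for s, _ in events})]
-- ===== Notes on version B (the rewrite author's own statement) =====
-- stated objective: alternative
-- what changed: Replaces incremental hash-map max-aggregation followed by a key sort with collecting the filtered (stamp,value) pairs into a flat list, then sorting the distinct stamps and taking a per-stamp max scan over the pair list.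
import Mathlib
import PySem

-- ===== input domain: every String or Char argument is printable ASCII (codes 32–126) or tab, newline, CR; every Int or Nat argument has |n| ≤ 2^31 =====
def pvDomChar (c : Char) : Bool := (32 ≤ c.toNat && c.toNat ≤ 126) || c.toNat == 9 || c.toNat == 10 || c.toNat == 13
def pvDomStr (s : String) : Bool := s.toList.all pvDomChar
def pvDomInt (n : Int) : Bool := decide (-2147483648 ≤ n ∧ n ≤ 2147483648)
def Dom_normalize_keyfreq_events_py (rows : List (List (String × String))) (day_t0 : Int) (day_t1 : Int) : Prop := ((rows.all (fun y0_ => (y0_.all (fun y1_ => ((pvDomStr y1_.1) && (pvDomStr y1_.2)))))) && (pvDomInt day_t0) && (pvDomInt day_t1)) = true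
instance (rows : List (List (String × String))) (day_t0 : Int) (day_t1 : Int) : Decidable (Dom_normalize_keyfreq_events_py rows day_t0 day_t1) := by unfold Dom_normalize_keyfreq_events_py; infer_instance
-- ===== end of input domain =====

-- B replaces A's hash-map max-aggregation + key sort by a flat filtered pair list,
-- sorted distinct stamps and a per-stamp max scan (objective: alternative decomposition).

-- Shared parse step: `int(row.get("t", 0))` / `int(row.get("s", 0))` guarded by the
-- try/except — textually identical in both Pythons. `none` = the except branch fires.
def pvParseTV (row : List (String × String)) : Option (Int × Int) :=
  let st := match (PySem.Dict.mk row).get? "t" with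
            | some s => PySem.Int.ofStr? s
            | none => some 0
  let sv := match (PySem.Dict.mk row).get? "s" with
            | some s => PySem.Int.ofStr? s
            | none => some 0
  match st, sv with
  | some a, some b => some (a, b)
  | _, _ => none

-- ===== PORT A =====
-- loop body of A's `for row in rows`
def pvStepA (day_t0 day_t1 : Int) (d : PySem.Dict Int Int) (row : List (String × String)) : PySem.Dict Int Int :=
  match pvParseTV row with
  | none => d
  | some (stamp, value) =>
    if stamp < day_t0 || day_t1 ≤ stamp then d
    else if value < 0 then d
    else match d.get? stamp with
         | none => d.insert stamp value
         | some prev => if prev < value then d.insert stamp value else d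

-- `collapsed[t]` in the final comprehension is ported as `getD t 0`: t ranges over
-- collapsed's own keys, so the lookup never raises and the default is never used.
def normalize_keyfreq_events_py (rows : List (List (String × String))) (day_t0 : Int) (day_t1 : Int) : List (List (String × Int)) :=
  let collapsed := rows.foldl (pvStepA day_t0 day_t1) PySem.Dict.empty
  (PySem.List.sorted collapsed.keys (fun t => t) false).map
    (fun t => [("t", t), ("s", collapsed.getD t 0)])

-- ===== PORT B =====
-- loop body of B's `for row in rows`
def pvStepB (day_t0 day_t1 : Int) (acc : List (Int × Int)) (row : List (String × String)) : List (Int × Int) :=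
  match pvParseTV row with
  | none => acc
  | some (stamp, value) =>
    if day_t0 ≤ stamp && stamp < day_t1 && 0 ≤ value then acc ++ [(stamp, value)] else acc

-- `max(v for s, v in events if s == t)` is ported as `max?` of the filtered values,
-- defaulted through a match: t comes from the set of stamps of events, so the
-- filtered list is nonempty and the `none` arm is never taken.
def normalize_keyfreq_events_py_alt (rows : List (List (String × String))) (day_t0 : Int) (day_t1 : Int) : List (List (String × Int)) :=
  let events := rows.foldl (pvStepB day_t0 day_t1) []
  (PySem.List.sorted (PySem.Set.ofList (events.map (·.1))) (fun t => t) false).map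
    (fun t => [("t", t),
               ("s", match PySem.List.max? ((events.filter (fun p => p.1 == t)).map (·.2)) (fun v => v) with
                     | some m => m
                     | none => 0)])

-- ===== PRECONDITION & SPEC =====
def Spec_normalize_keyfreq_events_py (rows : List (List (String × String))) (day_t0 : Int) (day_t1 : Int) (out : List (List (String × Int))) : Prop := out = normalize_keyfreq_events_py_alt rows day_t0 day_t1
instance (rows : List (List (String × String))) (day_t0 : Int) (day_t1 : Int) (out : List (List (String × Int))) : Decidable (Spec_normalize_keyfreq_events_py rows day_t0 day_t1 out) := by unfold Spec_normalize_keyfreq_events_py; infer_instance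

-- ===== CLAIM (what is proved, stated in full; the proofs are below) =====
def Claim_equal_normalize_keyfreq_events_py : Prop := ∀ (rows : List (List (String × String))) (day_t0 : Int) (day_t1 : Int), Dom_normalize_keyfreq_events_py rows day_t0 day_t1 → Spec_normalize_keyfreq_events_py rows day_t0 day_t1 (normalize_keyfreq_events_py rows day_t0 day_t1)

-- ===== LEMMAS AND PROOFS =====

theorem pvStepA_none {day_t0 day_t1 : Int} {d : PySem.Dict Int Int} {row : List (String × String)}
    (hp : pvParseTV row = none) : pvStepA day_t0 day_t1 d row = d := by
  unfold pvStepA; rw [hp]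

theorem pvStepA_drop {day_t0 day_t1 : Int} {d : PySem.Dict Int Int} {row : List (String × String)}
    {stamp value : Int} (hp : pvParseTV row = some (stamp, value))
    (hb : (stamp < day_t0 || day_t1 ≤ stamp) = true) :
    pvStepA day_t0 day_t1 d row = d := by
  simp [pvStepA, hp, hb]

theorem pvStepA_negv {day_t0 day_t1 : Int} {d : PySem.Dict Int Int} {row : List (String × String)}
    {stamp value : Int} (hp : pvParseTV row = some (stamp, value))
    (hb : (stamp < day_t0 || day_t1 ≤ stamp) = false) (hv : value < 0) :
    pvStepA day_t0 day_t1 d row = d := by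
  simp [pvStepA, hp, hb, hv]

theorem pvStepA_ok_none {day_t0 day_t1 : Int} {d : PySem.Dict Int Int} {row : List (String × String)}
    {stamp value : Int} (hp : pvParseTV row = some (stamp, value))
    (hb : (stamp < day_t0 || day_t1 ≤ stamp) = false) (hv : ¬ value < 0)
    (hget : d.get? stamp = none) :
    pvStepA day_t0 day_t1 d row = d.insert stamp value := by
  simp [pvStepA, hp, hb, hv, hget]

theorem pvStepA_ok_some {day_t0 day_t1 : Int} {d : PySem.Dict Int Int} {row : List (String × String)}
    {stamp value prev : Int} (hp : pvParseTV row = some (stamp, value))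
    (hb : (stamp < day_t0 || day_t1 ≤ stamp) = false) (hv : ¬ value < 0)
    (hget : d.get? stamp = some prev) :
    pvStepA day_t0 day_t1 d row = if prev < value then d.insert stamp value else d := by
  simp [pvStepA, hp, hb, hv, hget]

theorem pvStepB_none {day_t0 day_t1 : Int} {acc : List (Int × Int)} {row : List (String × String)}
    (hp : pvParseTV row = none) : pvStepB day_t0 day_t1 acc row = acc := by
  unfold pvStepB; rw [hp]

theorem pvStepB_some {day_t0 day_t1 : Int} {acc : List (Int × Int)} {row : List (String × String)}
    {stamp value : Int} (hp : pvParseTV row = some (stamp, value)) :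
    pvStepB day_t0 day_t1 acc row =
      if day_t0 ≤ stamp && stamp < day_t1 && 0 ≤ value then acc ++ [(stamp, value)] else acc := by
  unfold pvStepB; rw [hp]

-- running max of the values of the pairs of acc whose stamp is t (none = no such pair)
def pvAgg (acc : List (Int × Int)) (t : Int) : Option Int :=
  acc.foldl (fun o p => if p.1 = t then some (max (o.getD p.2) p.2) else o) none

theorem pvAgg_append (acc : List (Int × Int)) (s v t : Int) :
    pvAgg (acc ++ [(s, v)]) t
      = if s = t then some (max ((pvAgg acc t).getD v) v) else pvAgg acc t := by
  simp [pvAgg, List.foldl_append]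

theorem pvMax_append (vs : List Int) (v : Int) :
    PySem.List.max? (vs ++ [v]) (fun x => x)
      = some (max ((PySem.List.max? vs (fun x => x)).getD v) v) := by
  cases vs with
  | nil => simp [PySem.List.max?]
  | cons x t =>
    rw [List.cons_append, PySem.List.max?_id_cons, PySem.List.max?_id_cons,
      List.foldl_append]
    simp

theorem pvAgg_eq_max? (acc : List (Int × Int)) (t : Int) :
    pvAgg acc t
      = PySem.List.max? ((acc.filter (fun p => p.1 == t)).map (·.2)) (fun v => v) := by
  induction acc using List.reverseRecOn with
  | nil => rfl
  | append_singleton acc p ih =>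
    obtain ⟨s, v⟩ := p
    rw [pvAgg_append]
    by_cases hst : s = t
    · rw [if_pos hst, ih]
      have hfl : ((acc ++ [(s, v)]).filter (fun p => p.1 == t)).map (·.2)
          = (acc.filter (fun p => p.1 == t)).map (·.2) ++ [v] := by
        simp [List.filter_append, hst]
      rw [hfl, pvMax_append]
    · rw [if_neg hst]
      have hfl : ((acc ++ [(s, v)]).filter (fun p => p.1 == t)).map (·.2)
          = (acc.filter (fun p => p.1 == t)).map (·.2) := by
        simp [List.filter_append, hst]
      rw [hfl, ih]

theorem keys_invariant (rows : List (List (String × String))) (day_t0 day_t1 : Int)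
    (d : PySem.Dict Int Int) (acc : List (Int × Int))
    (hk : d.keys = PySem.Set.ofList (acc.map (·.1)))
    (hg : ∀ t, d.get? t = pvAgg acc t) :
    (rows.foldl (pvStepA day_t0 day_t1) d).keys
      = PySem.Set.ofList ((rows.foldl (pvStepB day_t0 day_t1) acc).map (·.1))
    ∧ ∀ t, (rows.foldl (pvStepA day_t0 day_t1) d).get? t
      = pvAgg (rows.foldl (pvStepB day_t0 day_t1) acc) t := by
  induction rows generalizing d acc with
  | nil => exact ⟨hk, hg⟩
  | cons row rest ih =>
    rw [List.foldl_cons, List.foldl_cons]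
    cases hp : pvParseTV row with
    | none => rw [pvStepA_none hp, pvStepB_none hp]; exact ih d acc hk hg
    | some p =>
      obtain ⟨stamp, value⟩ := p
      rw [pvStepB_some hp]
      by_cases h1 : stamp < day_t0 ∨ day_t1 ≤ stamp
      · have hb : (stamp < day_t0 || day_t1 ≤ stamp) = true := by
          simp only [Bool.or_eq_true, decide_eq_true_eq]; omega
        have hb2 : (day_t0 ≤ stamp && stamp < day_t1 && 0 ≤ value) = false := by
          simp only [Bool.and_eq_false_iff, decide_eq_false_iff_not]; omega
        rw [pvStepA_drop hp hb, hb2, if_neg Bool.false_ne_true]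
        exact ih d acc hk hg
      · have hb : (stamp < day_t0 || day_t1 ≤ stamp) = false := by
          simp only [Bool.or_eq_false_iff, decide_eq_false_iff_not]; omega
        push Not at h1
        by_cases h2 : value < 0
        · have hb2 : (day_t0 ≤ stamp && stamp < day_t1 && 0 ≤ value) = false := by
            simp only [Bool.and_eq_false_iff, decide_eq_false_iff_not]; omega
          rw [pvStepA_negv hp hb h2, hb2, if_neg Bool.false_ne_true]
          exact ih d acc hk hg
        · have hb2 : (day_t0 ≤ stamp && stamp < day_t1 && 0 ≤ value) = true := by
            simp only [Bool.and_eq_true, decide_eq_true_eq]; omega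
          rw [hb2, if_pos rfl]
          have hk' : ∀ (d' : PySem.Dict Int Int),
              d'.keys = PySem.Set.add (PySem.Set.ofList (acc.map (·.1))) stamp →
              (∀ t, d'.get? t = pvAgg (acc ++ [(stamp, value)]) t) →
              _ := fun d' h1' h2' => ih d' (acc ++ [(stamp, value)])
                (by rw [h1']; simp [PySem.Set.ofList_eq_foldl, List.foldl_append]) h2'
          cases hget : d.get? stamp with
          | none =>
            rw [pvStepA_ok_none hp hb h2 hget]
            refine hk' (d.insert stamp value) ?_ ?_
            · have hnc : d.contains stamp = false := by
                rw [PySem.Dict.contains_eq_isSome_get?, hget]; rfl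
              rw [PySem.Dict.keys_insert_of_not_contains _ _ hnc, hk]
              have hnm : stamp ∉ PySem.Set.ofList (acc.map (·.1)) := by
                intro hmem
                have hcm := PySem.Dict.contains_iff_mem_keys (d := d) (k := stamp)
                rw [hk] at hcm
                simp [hcm.mpr hmem] at hnc
              simp [PySem.Set.add, List.contains_eq_mem, hnm]
            · intro t
              rw [pvAgg_append]
              by_cases ht : stamp = t
              · subst ht
                rw [PySem.Dict.get?_insert_self, if_pos rfl, ← hg, hget]
                simp
              · rw [PySem.Dict.get?_insert_of_ne _ _ (fun h => ht h.symm), if_neg ht, hg]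
          | some prev =>
            rw [pvStepA_ok_some hp hb h2 hget]
            have hprev : pvAgg acc stamp = some prev := by rw [← hg, hget]
            have hc : d.contains stamp = true := by
              rw [PySem.Dict.contains_eq_isSome_get?, hget]; rfl
            have hmem : stamp ∈ PySem.Set.ofList (acc.map (·.1)) := by
              have hcm := (PySem.Dict.contains_iff_mem_keys (d := d) (k := stamp)).mp hc
              rwa [hk] at hcm
            have hadd : PySem.Set.add (PySem.Set.ofList (acc.map (·.1))) stamp
                = PySem.Set.ofList (acc.map (·.1)) := by
              simp [PySem.Set.add, List.contains_eq_mem, hmem]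
            by_cases h3 : prev < value
            · rw [if_pos h3]
              refine hk' (d.insert stamp value) ?_ ?_
              · rw [PySem.Dict.keys_insert_of_contains _ _ hc, hk, hadd]
              · intro t
                rw [pvAgg_append]
                by_cases ht : stamp = t
                · subst ht
                  rw [PySem.Dict.get?_insert_self, if_pos rfl, hprev]
                  simp [max_eq_right (le_of_lt h3)]
                · rw [PySem.Dict.get?_insert_of_ne _ _ (fun h => ht h.symm), if_neg ht, hg]
            · rw [if_neg h3]
              refine hk' d ?_ ?_
              · rw [hk, hadd]
              · intro t
                rw [pvAgg_append]
                by_cases ht : stamp = t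
                · subst ht
                  rw [if_pos rfl, hg, hprev]
                  simp [max_eq_left (not_lt.mp h3)]
                · rw [if_neg ht, hg]

-- ===== VERDICT (by name: the statement is the Claim_ definition above) =====
theorem normalize_keyfreq_events_py_spec : Claim_equal_normalize_keyfreq_events_py := by
  intro rows day_t0 day_t1 _
  unfold Spec_normalize_keyfreq_events_py
  simp only [normalize_keyfreq_events_py, normalize_keyfreq_events_py_alt]
  obtain ⟨hk, hg⟩ := keys_invariant rows day_t0 day_t1 PySem.Dict.empty []
    (by rfl) (fun t => by rfl)
  set events := rows.foldl (pvStepB day_t0 day_t1) ([] : List (Int × Int)) with hev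
  set d := rows.foldl (pvStepA day_t0 day_t1) PySem.Dict.empty with hd
  rw [hk]
  apply List.map_congr_left
  intro t ht
  have htmem : t ∈ PySem.Set.ofList (events.map (·.1)) :=
    (PySem.List.mem_sorted _ _ _ _).mp ht
  have hne : d.get? t ≠ none := by
    intro h
    rw [PySem.Dict.get?_eq_none_iff_not_mem_keys, hk] at h
    exact h htmem
  have hne2 : pvAgg events t ≠ none := by rw [← hg]; exact hne
  rw [pvAgg_eq_max?] at hne2
  rw [PySem.Dict.getD_eq_get?_getD, hg, pvAgg_eq_max?]
  cases hmx : PySem.List.max? ((events.filter (fun p => p.1 == t)).map (·.2)) (fun v => v) with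
  | none => exact absurd hmx hne2
  | some m => rfl
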